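-- pv_equiv track=rewrite | github.com/filipbagen/advent-of-code | 2024/08-2.py | get_line_of_sight
-- ===== SOURCE A (Python) =====
-- def get_line_of_sight(pos1, pos2, grid_rows, grid_cols):
--     r1, c1 = pos1
--     r2, c2 = pos2
--     points = set()
--
--     dr = r2 - r1
--     dc = c2 - c1
--
--     # Check both directions
--     for direction in [-1, 1]:
--         r, c = r1, c1
--         while 0 <= r < grid_rows and 0 <= c < grid_cols:
--             points.add((r, c))
--             r += dr * direction
--             c += dc * direction
--
--     return points
-- ===== SOURCE B (Python) =====
-- def _reach(x, d, n):
--     # largest t >= 0 with 0 <= x + t*d < n, given 0 <= x < n and d != 0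
--     if d > 0:
--         return (n - 1 - x) // d
--     return x // (-d)
--
--
-- def _extent(r, c, sr, sc, R, C):
--     # largest t >= 0 keeping (r + t*sr, c + t*sc) inside the R x C box; (sr, sc) != (0, 0)
--     if sr == 0:
--         return _reach(c, sc, C)
--     if sc == 0:
--         return _reach(r, sr, R)
--     return min(_reach(r, sr, R), _reach(c, sc, C))
--
--
-- def get_line_of_sight(pos1, pos2, grid_rows, grid_cols):
--     r1, c1 = pos1
--     r2, c2 = pos2
--     dr = r2 - r1
--     dc = c2 - c1
--     if not (0 <= r1 < grid_rows and 0 <= c1 < grid_cols):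
--         return set()
--     if dr == 0 and dc == 0:
--         return {(r1, c1)}
--     kneg = _extent(r1, c1, -dr, -dc, grid_rows, grid_cols)
--     kpos = _extent(r1, c1, dr, dc, grid_rows, grid_cols)
--     back = [(r1 - t * dr, c1 - t * dc) for t in range(kneg + 1)]
--     fwd = [(r1 + t * dr, c1 + t * dc) for t in range(1, kpos + 1)]
--     return set(back + fwd)
-- ===== Notes on version B (the rewrite author's own statement) =====
-- stated objective: alternative
-- what changed: A walks the line cell by cell in both directions with a bounds check per step; B computes the two in-bounds extents of the line in closed form by floor division and generates the point run directly (Pre_ excludes pos1 = pos2 with pos1 inside the grid, where A's while loop never advances and A never returns).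
import Mathlib
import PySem

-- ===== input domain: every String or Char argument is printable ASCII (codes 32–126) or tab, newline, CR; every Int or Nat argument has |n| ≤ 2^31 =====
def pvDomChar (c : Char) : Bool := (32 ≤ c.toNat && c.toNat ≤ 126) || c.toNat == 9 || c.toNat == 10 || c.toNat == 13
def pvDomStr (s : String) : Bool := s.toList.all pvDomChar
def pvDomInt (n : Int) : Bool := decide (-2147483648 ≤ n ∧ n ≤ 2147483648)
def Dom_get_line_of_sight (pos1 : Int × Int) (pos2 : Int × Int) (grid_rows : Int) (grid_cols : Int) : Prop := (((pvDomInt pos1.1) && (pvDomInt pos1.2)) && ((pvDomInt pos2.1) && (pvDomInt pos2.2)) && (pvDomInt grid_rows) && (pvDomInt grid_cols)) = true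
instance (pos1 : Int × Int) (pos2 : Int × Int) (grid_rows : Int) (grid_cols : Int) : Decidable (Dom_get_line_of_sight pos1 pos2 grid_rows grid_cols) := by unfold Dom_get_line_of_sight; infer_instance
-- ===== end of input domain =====

-- B replaces A's two cell-by-cell bounds-checked while loops by a closed-form (floor-division)
-- computation of the line's two in-bounds extents, then generates the points directly; objective: alternative.
-- A's Python returns a set; the equivalence below is about the set's insertion-order element list.

-- ===== PORT A =====

-- the Python loop guard `0 <= r < grid_rows and 0 <= c < grid_cols`
def pvInb (R C r c : Int) : Bool :=
  decide (0 ≤ r) && decide (r < R) && decide (0 ≤ c) && decide (c < C)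

-- the `while` loop of A for one direction; fuel only makes the recursion total —
-- any terminating run of the Python loop takes at most R.natAbs + C.natAbs + 2 iterations (proved below)
def pvWalk : Nat → Int → Int → Int → Int → Int → Int → PySem.Set (Int × Int) → PySem.Set (Int × Int)
  | 0, _, _, _, _, _, _, acc => acc
  | fuel + 1, r, c, sr, sc, R, C, acc =>
      if pvInb R C r c then
        pvWalk fuel (r + sr) (c + sc) sr sc R C (PySem.Set.add acc (r, c))
      else acc

def get_line_of_sight (pos1 : Int × Int) (pos2 : Int × Int) (grid_rows : Int) (grid_cols : Int) : List (Int × Int) :=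
  let r1 := pos1.1
  let c1 := pos1.2
  let r2 := pos2.1
  let c2 := pos2.2
  let dr := r2 - r1
  let dc := c2 - c1
  let fuel := grid_rows.natAbs + grid_cols.natAbs + 2
  -- for direction in [-1, 1]
  let points := pvWalk fuel r1 c1 (-dr) (-dc) grid_rows grid_cols PySem.Set.empty
  pvWalk fuel r1 c1 dr dc grid_rows grid_cols points

-- ===== PORT B =====

-- largest t >= 0 with 0 <= x + t*d < n, given 0 <= x < n and d != 0
def pvReach (x d n : Int) : Int :=
  if d > 0 then PySem.Int.floordiv (n - 1 - x) d
  else PySem.Int.floordiv x (-d)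

-- largest t >= 0 keeping (r + t*sr, c + t*sc) inside the R x C box; (sr, sc) != (0, 0)
def pvExtent (r c sr sc R C : Int) : Int :=
  if sr = 0 then pvReach c sc C
  else if sc = 0 then pvReach r sr R
  else min (pvReach r sr R) (pvReach c sc C)

def get_line_of_sight_alt (pos1 : Int × Int) (pos2 : Int × Int) (grid_rows : Int) (grid_cols : Int) : List (Int × Int) :=
  let r1 := pos1.1
  let c1 := pos1.2
  let r2 := pos2.1
  let c2 := pos2.2
  let dr := r2 - r1
  let dc := c2 - c1
  if 0 ≤ r1 ∧ r1 < grid_rows ∧ 0 ≤ c1 ∧ c1 < grid_cols then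
    if dr = 0 ∧ dc = 0 then [(r1, c1)]
    else
      let kneg := pvExtent r1 c1 (-dr) (-dc) grid_rows grid_cols
      let kpos := pvExtent r1 c1 dr dc grid_rows grid_cols
      let back := (PySem.List.pyRange 0 (kneg + 1) 1).map (fun t => (r1 - t * dr, c1 - t * dc))
      let fwd := (PySem.List.pyRange 1 (kpos + 1) 1).map (fun t => (r1 + t * dr, c1 + t * dc))
      PySem.Set.ofList (back ++ fwd)
  else []

-- ===== PRECONDITION & SPEC =====

-- Pre_ excludes only the inputs where pos1 = pos2 and pos1 is inside the grid: there A's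
-- while loop never advances and the Python never returns (infinite loop).
def Pre_get_line_of_sight (pos1 : Int × Int) (pos2 : Int × Int) (grid_rows : Int) (grid_cols : Int) : Prop :=
  ¬ (pos1 = pos2 ∧ 0 ≤ pos1.1 ∧ pos1.1 < grid_rows ∧ 0 ≤ pos1.2 ∧ pos1.2 < grid_cols)

instance (pos1 : Int × Int) (pos2 : Int × Int) (grid_rows : Int) (grid_cols : Int) : Decidable (Pre_get_line_of_sight pos1 pos2 grid_rows grid_cols) := by unfold Pre_get_line_of_sight; infer_instance

def pvWitness_get_line_of_sight : (Int × Int) × (Int × Int) × Int × Int := ((1, 1), (2, 3), 5, 5)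

def Spec_get_line_of_sight (pos1 : Int × Int) (pos2 : Int × Int) (grid_rows : Int) (grid_cols : Int) (out : List (Int × Int)) : Prop := out = get_line_of_sight_alt pos1 pos2 grid_rows grid_cols
instance (pos1 : Int × Int) (pos2 : Int × Int) (grid_rows : Int) (grid_cols : Int) (out : List (Int × Int)) : Decidable (Spec_get_line_of_sight pos1 pos2 grid_rows grid_cols out) := by unfold Spec_get_line_of_sight; infer_instance

-- ===== CLAIM (what is proved, stated in full; the proofs are below) =====
def Claim_equal_get_line_of_sight : Prop := ∀ (pos1 : Int × Int) (pos2 : Int × Int) (grid_rows : Int) (grid_cols : Int), Dom_get_line_of_sight pos1 pos2 grid_rows grid_cols → Pre_get_line_of_sight pos1 pos2 grid_rows grid_cols → Spec_get_line_of_sight pos1 pos2 grid_rows grid_cols (get_line_of_sight pos1 pos2 grid_rows grid_cols)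

-- ===== LEMMAS AND PROOFS =====

lemma pvInb_iff (R C r c : Int) : pvInb R C r c = true ↔ (0 ≤ r ∧ r < R ∧ 0 ≤ c ∧ c < C) := by
  simp [pvInb, and_assoc]

lemma pvWalk_stop (fuel : Nat) (r c sr sc R C : Int) (acc : PySem.Set (Int × Int))
    (h : pvInb R C r c = false) : pvWalk fuel r c sr sc R C acc = acc := by
  cases fuel <;> simp [pvWalk, h]

-- the while loop of A, run from a start that stays in bounds for exactly k+1 steps,
-- folds Set.add over those k+1 visited points
lemma pvWalk_run (R C sr sc : Int) (k : Nat) :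
    ∀ (fuel : Nat) (r c : Int) (acc : PySem.Set (Int × Int)),
      k + 2 ≤ fuel →
      (∀ t : Nat, t ≤ k → pvInb R C (r + (t : Int) * sr) (c + (t : Int) * sc) = true) →
      pvInb R C (r + ((k : Int) + 1) * sr) (c + ((k : Int) + 1) * sc) = false →
      pvWalk fuel r c sr sc R C acc =
        List.foldl PySem.Set.add acc
          ((List.range (k + 1)).map fun t : Nat => (r + (t : Int) * sr, c + (t : Int) * sc)) := by
  induction k with
  | zero =>
      intro fuel r c acc hf hin hout
      obtain ⟨f, rfl⟩ : ∃ f, fuel = f + 2 := ⟨fuel - 2, by omega⟩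
      have h0 := hin 0 (le_refl 0)
      simp only [Nat.cast_zero, zero_mul, add_zero] at h0
      have h1 : pvInb R C (r + sr) (c + sc) = false := by
        simpa using hout
      simp [pvWalk, h0, h1]
  | succ k ih =>
      intro fuel r c acc hf hin hout
      obtain ⟨f, rfl⟩ : ∃ f, fuel = f + 1 := ⟨fuel - 1, by omega⟩
      have h0 := hin 0 (Nat.zero_le _)
      simp only [Nat.cast_zero, zero_mul, add_zero] at h0
      have step : pvWalk (f + 1) r c sr sc R C acc =
          pvWalk f (r + sr) (c + sc) sr sc R C (PySem.Set.add acc (r, c)) := by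
        simp [pvWalk, h0]
      rw [step]
      have hin' : ∀ t : Nat, t ≤ k →
          pvInb R C ((r + sr) + (t : Int) * sr) ((c + sc) + (t : Int) * sc) = true := by
        intro t ht
        have := hin (t + 1) (by omega)
        have e1 : r + ((t + 1 : Nat) : Int) * sr = (r + sr) + (t : Int) * sr := by push_cast; ring
        have e2 : c + ((t + 1 : Nat) : Int) * sc = (c + sc) + (t : Int) * sc := by push_cast; ring
        rwa [e1, e2] at this
      have hout' : pvInb R C ((r + sr) + ((k : Int) + 1) * sr) ((c + sc) + ((k : Int) + 1) * sc) = false := by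
        have e1 : r + (((k + 1 : Nat) : Int) + 1) * sr = (r + sr) + ((k : Int) + 1) * sr := by push_cast; ring
        have e2 : c + (((k + 1 : Nat) : Int) + 1) * sc = (c + sc) + ((k : Int) + 1) * sc := by push_cast; ring
        rwa [e1, e2] at hout
      have hlist : ((List.range (k + 1 + 1)).map fun t : Nat => (r + (t : Int) * sr, c + (t : Int) * sc)) =
          (r, c) :: ((List.range (k + 1)).map fun t : Nat => ((r + sr) + (t : Int) * sr, (c + sc) + (t : Int) * sc)) := by
        rw [List.range_succ_eq_map, List.map_cons, List.map_map]
        congr 1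
        · simp
        · apply List.map_congr_left
          intro t _
          simp only [Function.comp_apply, Nat.succ_eq_add_one, Prod.mk.injEq]
          constructor <;> (push_cast; ring)
      rw [hlist, List.foldl_cons]
      exact ih f (r + sr) (c + sc) (PySem.Set.add acc (r, c)) (by omega) hin' hout'

-- closed-form extent: the floordiv bracket facts for one coordinate
lemma pvReach_spec (x d n : Int) (hd : d ≠ 0) (h0 : 0 ≤ x) (h1 : x < n) :
    0 ≤ pvReach x d n ∧ pvReach x d n ≤ n - 1 ∧
    (∀ t : Int, 0 ≤ t → t ≤ pvReach x d n → 0 ≤ x + t * d ∧ x + t * d < n) ∧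
    ¬ (0 ≤ x + (pvReach x d n + 1) * d ∧ x + (pvReach x d n + 1) * d < n) := by
  rcases lt_or_gt_of_ne hd with hneg | hpos
  · -- d < 0 : pvReach = x // (-d)
    have hdpos : (0:Int) < -d := by omega
    have hR : pvReach x d n = PySem.Int.floordiv x (-d) := by
      unfold pvReach; rw [if_neg (by omega : ¬ d > 0)]
    set q := PySem.Int.floordiv x (-d) with hq
    have hle : q * (-d) ≤ x := (PySem.Int.le_floordiv_iff_mul_le hdpos).mp (le_refl q)
    have hlt : x < (q + 1) * (-d) := (PySem.Int.floordiv_lt_iff_lt_mul hdpos).mp (by omega)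
    have hq0 : 0 ≤ q := by
      rw [hq, PySem.Int.le_floordiv_iff_mul_le hdpos]; omega
    refine ⟨by rw [hR]; exact hq0, ?_, ?_, ?_⟩
    · rw [hR]
      nlinarith
    · intro t ht0 htq
      rw [hR] at htq
      have h2 : t * (-d) ≤ q * (-d) := by
        apply mul_le_mul_of_nonneg_right htq (le_of_lt hdpos)
      constructor <;> nlinarith
    · rw [hR]
      intro ⟨ha, _⟩
      nlinarith
  · -- d > 0 : pvReach = (n - 1 - x) // d
    have hR : pvReach x d n = PySem.Int.floordiv (n - 1 - x) d := by simp [pvReach, hpos]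
    set q := PySem.Int.floordiv (n - 1 - x) d with hq
    have hle : q * d ≤ n - 1 - x := (PySem.Int.le_floordiv_iff_mul_le hpos).mp (le_refl q)
    have hlt : n - 1 - x < (q + 1) * d := (PySem.Int.floordiv_lt_iff_lt_mul hpos).mp (by omega)
    have hq0 : 0 ≤ q := by
      rw [hq, PySem.Int.le_floordiv_iff_mul_le hpos]; omega
    refine ⟨by rw [hR]; exact hq0, ?_, ?_, ?_⟩
    · rw [hR]
      nlinarith
    · intro t ht0 htq
      rw [hR] at htq
      have h2 : t * d ≤ q * d := mul_le_mul_of_nonneg_right htq (le_of_lt hpos)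
      constructor <;> nlinarith
    · rw [hR]
      intro ⟨_, hb⟩
      nlinarith

-- closed-form extent: all of [0, k] stays in the box, k+1 leaves it, and k is small
lemma pvExtent_spec (r c sr sc R C : Int) (hs : ¬ (sr = 0 ∧ sc = 0))
    (hr0 : 0 ≤ r) (hr1 : r < R) (hc0 : 0 ≤ c) (hc1 : c < C) :
    0 ≤ pvExtent r c sr sc R C ∧
    pvExtent r c sr sc R C ≤ R.natAbs + C.natAbs ∧
    (∀ t : Int, 0 ≤ t → t ≤ pvExtent r c sr sc R C →
      pvInb R C (r + t * sr) (c + t * sc) = true) ∧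
    pvInb R C (r + (pvExtent r c sr sc R C + 1) * sr) (c + (pvExtent r c sr sc R C + 1) * sc) = false := by
  by_cases hsr : sr = 0
  · have hsc : sc ≠ 0 := by tauto
    obtain ⟨e0, e1, e2, e3⟩ := pvReach_spec c sc C hsc hc0 hc1
    have hE : pvExtent r c sr sc R C = pvReach c sc C := by simp [pvExtent, hsr]
    rw [hE]
    refine ⟨e0, by omega, ?_, ?_⟩
    · intro t ht0 ht1
      rw [pvInb_iff, hsr]
      have := e2 t ht0 ht1
      constructor <;> [skip; constructor <;> [skip; exact this]] <;> omega
    · rw [← Bool.not_eq_true, pvInb_iff, hsr]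
      intro ⟨_, _, h3, h4⟩
      exact e3 ⟨h3, h4⟩
  · by_cases hsc : sc = 0
    · obtain ⟨e0, e1, e2, e3⟩ := pvReach_spec r sr R hsr hr0 hr1
      have hE : pvExtent r c sr sc R C = pvReach r sr R := by simp [pvExtent, hsr, hsc]
      rw [hE]
      refine ⟨e0, by omega, ?_, ?_⟩
      · intro t ht0 ht1
        rw [pvInb_iff, hsc]
        have := e2 t ht0 ht1
        exact ⟨this.1, this.2, by omega, by omega⟩
      · rw [← Bool.not_eq_true, pvInb_iff, hsc]
        intro ⟨h1, h2, _, _⟩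
        exact e3 ⟨h1, h2⟩
    · obtain ⟨er0, er1, er2, er3⟩ := pvReach_spec r sr R hsr hr0 hr1
      obtain ⟨ec0, ec1, ec2, ec3⟩ := pvReach_spec c sc C hsc hc0 hc1
      have hE : pvExtent r c sr sc R C = min (pvReach r sr R) (pvReach c sc C) := by
        simp [pvExtent, hsr, hsc]
      rw [hE]
      refine ⟨le_min er0 ec0, ?_, ?_, ?_⟩
      · have := min_le_left (pvReach r sr R) (pvReach c sc C); omega
      · intro t ht0 ht1
        rw [pvInb_iff]
        have h1 := er2 t ht0 (le_trans ht1 (min_le_left _ _))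
        have h2 := ec2 t ht0 (le_trans ht1 (min_le_right _ _))
        exact ⟨h1.1, h1.2, h2.1, h2.2⟩
      · rw [← Bool.not_eq_true, pvInb_iff]
        rcases min_choice (pvReach r sr R) (pvReach c sc C) with hm | hm <;> rw [hm]
        · intro ⟨h1, h2, _, _⟩; exact er3 ⟨h1, h2⟩
        · intro ⟨_, _, h3, h4⟩; exact ec3 ⟨h3, h4⟩

-- one direction of A's loop equals the fold of Set.add over B's closed-form point list
lemma pvWalk_eq_fold (r c sr sc R C : Int) (acc : PySem.Set (Int × Int))
    (hs : ¬ (sr = 0 ∧ sc = 0)) (hr0 : 0 ≤ r) (hr1 : r < R) (hc0 : 0 ≤ c) (hc1 : c < C) :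
    pvWalk (R.natAbs + C.natAbs + 2) r c sr sc R C acc =
      List.foldl PySem.Set.add acc
        ((List.range ((pvExtent r c sr sc R C).toNat + 1)).map
          fun t : Nat => (r + (t : Int) * sr, c + (t : Int) * sc)) := by
  obtain ⟨e0, e1, e2, e3⟩ := pvExtent_spec r c sr sc R C hs hr0 hr1 hc0 hc1
  set k := pvExtent r c sr sc R C with hk
  have hkt : (k.toNat : Int) = k := Int.toNat_of_nonneg e0
  apply pvWalk_run
  · omega
  · intro t ht
    apply e2
    · exact Int.natCast_nonneg t
    · omega
  · rw [hkt]; exact e3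

lemma pyRange_map_eq (a : Int) (n : Nat) (f : Int → Int × Int) :
    (PySem.List.pyRange a (a + n) 1).map f = (List.range n).map (fun t : Nat => f (a + t)) := by
  rw [PySem.List.pyRange_one]
  have : (a + (n : Int) - a).toNat = n := by omega
  rw [this, List.map_map]
  rfl

-- ===== VERDICT (by name: the statement is the Claim_ definition above) =====
theorem get_line_of_sight_spec : Claim_equal_get_line_of_sight := by
  intro pos1 pos2 R C _ hpre
  unfold Spec_get_line_of_sight get_line_of_sight get_line_of_sight_alt
  obtain ⟨r1, c1⟩ := pos1
  obtain ⟨r2, c2⟩ := pos2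
  simp only []
  by_cases hin : 0 ≤ r1 ∧ r1 < R ∧ 0 ≤ c1 ∧ c1 < C
  · obtain ⟨h1, h2, h3, h4⟩ := hin
    have hne : ¬ (r2 - r1 = 0 ∧ c2 - c1 = 0) := by
      intro ⟨ha, hb⟩
      exact hpre ⟨by simp [Prod.ext_iff]; omega, h1, h2, h3, h4⟩
    rw [if_pos ⟨h1, h2, h3, h4⟩, if_neg hne]
    set dr := r2 - r1 with hdr
    set dc := c2 - c1 with hdc
    have hneg : ¬ (-dr = 0 ∧ -dc = 0) := by intro ⟨ha, hb⟩; exact hne ⟨by omega, by omega⟩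
    set kneg := pvExtent r1 c1 (-dr) (-dc) R C with hkneg
    set kpos := pvExtent r1 c1 dr dc R C with hkpos
    obtain ⟨en0, _, _, _⟩ := pvExtent_spec r1 c1 (-dr) (-dc) R C hneg h1 h2 h3 h4
    obtain ⟨ep0, _, _, _⟩ := pvExtent_spec r1 c1 dr dc R C hne h1 h2 h3 h4
    -- A's first (direction -1) walk
    rw [pvWalk_eq_fold r1 c1 (-dr) (-dc) R C PySem.Set.empty hneg h1 h2 h3 h4]
    rw [pvWalk_eq_fold r1 c1 dr dc R C _ hne h1 h2 h3 h4]
    -- B's two lists, rewritten to List.range form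
    have hb : (PySem.List.pyRange 0 (kneg + 1) 1).map (fun t => (r1 - t * dr, c1 - t * dc)) =
        (List.range (kneg.toNat + 1)).map (fun t : Nat => (r1 + (t : Int) * (-dr), c1 + (t : Int) * (-dc))) := by
      have h : kneg + 1 = 0 + ((kneg.toNat + 1 : Nat) : Int) := by omega
      rw [h, pyRange_map_eq]
      apply List.map_congr_left
      intro t _
      simp only [Prod.mk.injEq]
      constructor <;> ring
    have hf : (PySem.List.pyRange 1 (kpos + 1) 1).map (fun t => (r1 + t * dr, c1 + t * dc)) =
        (List.range kpos.toNat).map (fun t : Nat => (r1 + ((t : Int) + 1) * dr, c1 + ((t : Int) + 1) * dc)) := by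
      have h : kpos + 1 = 1 + ((kpos.toNat : Nat) : Int) := by omega
      rw [h, pyRange_map_eq]
      apply List.map_congr_left
      intro t _
      simp only [Prod.mk.injEq]
      constructor <;> ring
    rw [hb, hf]
    -- fold over the concatenation
    rw [show PySem.Set.ofList
          (((List.range (kneg.toNat + 1)).map fun t : Nat => (r1 + (t : Int) * (-dr), c1 + (t : Int) * (-dc))) ++
           ((List.range kpos.toNat).map fun t : Nat => (r1 + ((t : Int) + 1) * dr, c1 + ((t : Int) + 1) * dc))) =
        List.foldl PySem.Set.add
          (List.foldl PySem.Set.add PySem.Set.empty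
            ((List.range (kneg.toNat + 1)).map fun t : Nat => (r1 + (t : Int) * (-dr), c1 + (t : Int) * (-dc))))
          ((List.range kpos.toNat).map fun t : Nat => (r1 + ((t : Int) + 1) * dr, c1 + ((t : Int) + 1) * dc)) from by
      rw [PySem.Set.ofList_eq_foldl, List.foldl_append]; rfl]
    -- A's forward walk revisits (r1, c1) first; it is already in the set
    have hmem : (r1, c1) ∈ List.foldl PySem.Set.add PySem.Set.empty
        ((List.range (kneg.toNat + 1)).map fun t : Nat => (r1 + (t : Int) * (-dr), c1 + (t : Int) * (-dc))) := by
      rw [PySem.Set.mem_foldl_add]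
      right
      refine ⟨(r1, c1), ?_, rfl⟩
      refine List.mem_map.mpr ⟨0, ?_, ?_⟩ <;> simp
    have hsplit : ((List.range (kpos.toNat + 1)).map fun t : Nat => (r1 + (t : Int) * dr, c1 + (t : Int) * dc)) =
        (r1, c1) :: ((List.range kpos.toNat).map fun t : Nat => (r1 + ((t : Int) + 1) * dr, c1 + ((t : Int) + 1) * dc)) := by
      rw [List.range_succ_eq_map, List.map_cons, List.map_map]
      simp only [Nat.cast_zero, zero_mul, add_zero]
      congr 1
    rw [hsplit, List.foldl_cons, PySem.Set.add_of_mem hmem]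
  · -- start out of bounds: both sides are the empty set
    have hib : pvInb R C r1 c1 = false := by
      rw [← Bool.not_eq_true, pvInb_iff]; exact hin
    rw [if_neg hin, pvWalk_stop _ _ _ _ _ _ _ _ hib, pvWalk_stop _ _ _ _ _ _ _ _ hib]
    rfl
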